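-- pv_equiv track=rewrite | github.com/fkeegan/keenbench | engine/tools/pyworker/worker.py | _tabular_selected_columns
-- ===== SOURCE A (Python) =====
-- from typing import Any, Callable, Dict, List, Optional, Set, Tuple
--
-- class WorkerError(Exception):
--     def __init__(self, code: str, message: str):
--         super().__init__(message)
--         self.code = code
--         self.message = message
--
-- def _tabular_selected_columns(params: Dict[str, Any], schema: List[Dict[str, Any]]) -> List[Dict[str, Any]]:
--     schema_by_name: Dict[str, Dict[str, Any]] = {}
--     for col in schema:
--         schema_by_name[str(col.get("name"))] = col
--
--     requested = params.get("columns")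
--     if requested is None:
--         return list(schema)
--     if not isinstance(requested, list) or len(requested) == 0:
--         raise WorkerError("VALIDATION_FAILED", "columns must be a non-empty list")
--
--     selected: List[Dict[str, Any]] = []
--     seen: Set[str] = set()
--     for raw in requested:
--         if not isinstance(raw, str) or not raw.strip():
--             raise WorkerError("VALIDATION_FAILED", "invalid column name")
--         name = raw.strip()
--         if name in seen:
--             continue
--         col = schema_by_name.get(name)
--         if col is None:
--             raise WorkerError("VALIDATION_FAILED", f"unknown column: {name}")
--         selected.append(col)
--         seen.add(name)
--     if len(selected) == 0:
--         raise WorkerError("VALIDATION_FAILED", "missing columns")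
--     return selected
-- ===== SOURCE B (Python) =====
-- from typing import Any, Dict, List
--
-- class WorkerError(Exception):
--     def __init__(self, code: str, message: str):
--         super().__init__(message)
--         self.code = code
--         self.message = message
--
-- def _tabular_selected_columns(params: Dict[str, Any], schema: List[Dict[str, Any]]) -> List[Dict[str, Any]]:
--     requested = params.get("columns")
--     if requested is None:
--         return list(schema)
--     if not isinstance(requested, list) or len(requested) == 0:
--         raise WorkerError("VALIDATION_FAILED", "columns must be a non-empty list")
--     names: List[str] = []
--     for raw in requested:
--         if not isinstance(raw, str) or not raw.strip():
--             raise WorkerError("VALIDATION_FAILED", "invalid column name")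
--         name = raw.strip()
--         if name not in names:
--             names.append(name)
--     def find_column(name: str) -> Dict[str, Any]:
--         for col in schema:
--             if str(col.get("name")) == name:
--                 return col
--         raise WorkerError("VALIDATION_FAILED", f"unknown column: {name}")
--     return [find_column(name) for name in names]
-- ===== Notes on version B (the rewrite author's own statement) =====
-- stated objective: simpler
-- what changed: Drops A's upfront name->column dict and its combined validate+lookup loop: B validates and dedups the stripped names in one pass, then maps each name to the first matching schema column by a direct scan; Pre_ excludes requests naming a column whose name occurs more than once in the schema, where A's dict-reinsertion last-wins choice is accidental and B's first-match is equally defensible.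
import Mathlib
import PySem

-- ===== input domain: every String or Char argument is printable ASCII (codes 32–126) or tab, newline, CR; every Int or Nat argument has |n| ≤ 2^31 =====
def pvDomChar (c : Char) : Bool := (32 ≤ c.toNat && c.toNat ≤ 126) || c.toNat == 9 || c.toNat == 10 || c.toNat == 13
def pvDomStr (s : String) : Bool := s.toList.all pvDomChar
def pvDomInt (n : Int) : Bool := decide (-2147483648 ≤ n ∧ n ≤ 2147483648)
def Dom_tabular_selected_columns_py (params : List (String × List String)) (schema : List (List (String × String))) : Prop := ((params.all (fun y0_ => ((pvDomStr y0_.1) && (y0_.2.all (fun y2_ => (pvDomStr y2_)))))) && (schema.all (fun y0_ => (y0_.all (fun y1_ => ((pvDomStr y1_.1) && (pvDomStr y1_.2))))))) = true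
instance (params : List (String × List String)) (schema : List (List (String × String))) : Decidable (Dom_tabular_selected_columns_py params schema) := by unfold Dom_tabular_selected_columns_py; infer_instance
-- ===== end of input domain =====

-- B drops A's upfront name→column dict for a two-phase pass (validate+dedup the
-- stripped names, then map each to the first matching schema column); equivalence
-- of the RETURN value on non-raising, duplicate-free-name inputs (Pre_) is proved.

-- str(col.get("name")): the column's name, "None" when the key is absent (str(None))
def pvColName (col : List (String × String)) : String :=
  match (PySem.Dict.mk col).get? "name" with
  | some s => s
  | none => "None"

-- ===== PORT A =====
-- the for-raw-in-requested loop; none = WorkerError raised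
def pvLoopA (sbn : PySem.Dict String (List (String × String))) :
    List String → List (List (String × String)) → PySem.Set String →
    Option (List (List (String × String)))
  | [], selected, _ => some selected
  | raw :: rest, selected, seen =>
    if PySem.Str.strip raw = "" then none
    else
      let name := PySem.Str.strip raw
      if PySem.Set.contains seen name then pvLoopA sbn rest selected seen
      else
        match sbn.get? name with
        | none => none
        | some col => pvLoopA sbn rest (selected ++ [col]) (PySem.Set.add seen name)

def tabular_selected_columns_py (params : List (String × List String)) (schema : List (List (String × String))) : List (List (String × String)) :=
  let schema_by_name : PySem.Dict String (List (String × String)) :=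
    schema.foldl (fun d col => d.insert (pvColName col) col) PySem.Dict.empty
  match (PySem.Dict.mk params).get? "columns" with
  | none => schema
  | some requested =>
    if requested = [] then []  -- WorkerError "columns must be a non-empty list"; outside Pre_
    else
      match pvLoopA schema_by_name requested [] PySem.Set.empty with
      | none => []             -- WorkerError ("invalid column name" / "unknown column"); outside Pre_
      | some selected => if selected = [] then [] else selected  -- [] branch = WorkerError "missing columns"

-- ===== PORT B =====
-- validate and dedup the stripped names (none = WorkerError)
def pvNamesB : List String → List String → Option (List String)
  | [], names => some names
  | raw :: rest, names =>
    if PySem.Str.strip raw = "" then none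
    else
      let name := PySem.Str.strip raw
      pvNamesB rest (if name ∈ names then names else names ++ [name])

-- find_column: first schema column bearing the name
def pvLookupB (schema : List (List (String × String))) (name : String) :
    Option (List (String × String)) :=
  schema.find? (fun col => pvColName col == name)

-- [find_column(name) for name in names]; none = WorkerError "unknown column"
def pvBuildB (schema : List (List (String × String))) :
    List String → Option (List (List (String × String)))
  | [] => some []
  | n :: rest =>
    match pvLookupB schema n with
    | none => none
    | some col => (pvBuildB schema rest).map (col :: ·)

def tabular_selected_columns_py_alt (params : List (String × List String)) (schema : List (List (String × String))) : List (List (String × String)) :=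
  match (PySem.Dict.mk params).get? "columns" with
  | none => schema
  | some requested =>
    if requested = [] then []  -- WorkerError; outside Pre_
    else
      match pvNamesB requested [] with
      | none => []             -- WorkerError; outside Pre_
      | some names =>
        match pvBuildB schema names with
        | none => []           -- WorkerError; outside Pre_
        | some sel => sel

-- ===== PRECONDITION & SPEC =====
-- Pre_ excludes the inputs where A raises WorkerError (an empty "columns" list, a name
-- that strips to empty, a name absent from the schema), and additionally requests naming
-- a column whose name occurs more than once in the schema, where A's dict-reinsertion
-- last-wins choice is accidental and B's first-match is equally defensible.
def Pre_tabular_selected_columns_py (params : List (String × List String)) (schema : List (List (String × String))) : Prop :=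
  (((PySem.Dict.mk params).get? "columns").all (fun req =>
    decide (req ≠ [] ∧ ∀ raw ∈ req, PySem.Str.strip raw ≠ "" ∧
      (schema.map pvColName).count (PySem.Str.strip raw) = 1))) = true
instance (params : List (String × List String)) (schema : List (List (String × String))) : Decidable (Pre_tabular_selected_columns_py params schema) := by unfold Pre_tabular_selected_columns_py; infer_instance

def pvWitness_tabular_selected_columns_py : (List (String × List String)) × (List (List (String × String))) :=
  ([("columns", ["a", " b "])], [[("name", "a"), ("t", "int")], [("name", "b")]])

def Spec_tabular_selected_columns_py (params : List (String × List String)) (schema : List (List (String × String))) (out : List (List (String × String))) : Prop := out = tabular_selected_columns_py_alt params schema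
instance (params : List (String × List String)) (schema : List (List (String × String))) (out : List (List (String × String))) : Decidable (Spec_tabular_selected_columns_py params schema out) := by unfold Spec_tabular_selected_columns_py; infer_instance

-- ===== CLAIM (what is proved, stated in full; the proofs are below) =====
def Claim_equal_tabular_selected_columns_py : Prop := ∀ (params : List (String × List String)) (schema : List (List (String × String))), Dom_tabular_selected_columns_py params schema → Pre_tabular_selected_columns_py params schema → Spec_tabular_selected_columns_py params schema (tabular_selected_columns_py params schema)

-- ===== LEMMAS AND PROOFS =====

-- the dict built by A's first loop answers lookups like a last-match scan
theorem pvGet_fold (cs : List (List (String × String)))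
    (d : PySem.Dict String (List (String × String))) (name : String) :
    (cs.foldl (fun d col => d.insert (pvColName col) col) d).get? name
      = (cs.reverse.find? (fun col => pvColName col == name)).or (d.get? name) := by
  induction cs generalizing d with
  | nil => simp
  | cons c cs ih =>
    simp only [List.foldl_cons, List.reverse_cons, List.find?_append]
    rw [ih]
    rcases h : cs.reverse.find? (fun col => pvColName col == name) with _ | v
    · by_cases he : pvColName c = name <;>
        simp [PySem.Dict.get?_insert, he, Ne.symm]
    · simp

-- when a predicate holds at most once, the last match is the first match
theorem pvFind_reverse {α : Type} (l : List α) (p : α → Bool)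
    (h : l.countP p ≤ 1) : l.reverse.find? p = l.find? p := by
  induction l with
  | nil => simp
  | cons a l ih =>
    rw [List.countP_cons] at h
    simp only [List.reverse_cons, List.find?_append, List.find?_cons]
    by_cases hp : p a = true
    · have h0 : l.countP p = 0 := by rw [if_pos hp] at h; omega
      have hz := List.countP_eq_zero.mp h0
      have h2 : l.reverse.find? p = none :=
        List.find?_eq_none.mpr fun x hx => hz x (List.mem_reverse.mp hx)
      simp [hp, h2]
    · have h3 := ih (by rw [if_neg hp] at h; omega)
      simp [hp, h3, Option.or_none]

-- under a unique name, the dict lookup equals B's first-match scan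
theorem pvGet_sbn (schema : List (List (String × String))) (name : String)
    (h : (schema.map pvColName).count name = 1) :
    (schema.foldl (fun d col => d.insert (pvColName col) col) PySem.Dict.empty).get? name
      = pvLookupB schema name := by
  rw [pvGet_fold]
  have hc : schema.countP (fun col => pvColName col == name) ≤ 1 := by
    rw [List.count, List.countP_map] at h
    simpa [Function.comp] using h.le
  rw [pvFind_reverse _ _ hc]
  simp [pvLookupB]

-- proof-side: the names A's loop newly adds, given the already-seen ones
def pvNew : List String → List String → List String
  | [], _ => []
  | raw :: rest, names =>
    let n := PySem.Str.strip raw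
    if n ∈ names then pvNew rest names else n :: pvNew rest (names ++ [n])

theorem pvNamesB_eq (req names : List String)
    (h : ∀ raw ∈ req, PySem.Str.strip raw ≠ "") :
    pvNamesB req names = some (names ++ pvNew req names) := by
  induction req generalizing names with
  | nil => simp [pvNamesB, pvNew]
  | cons raw rest ih =>
    have hr : PySem.Str.strip raw ≠ "" := h raw (by simp)
    simp only [pvNamesB, pvNew, if_neg hr]
    by_cases hm : PySem.Str.strip raw ∈ names
    · simp only [if_pos hm]; exact ih names fun r hr' => h r (by simp [hr'])
    · simp only [if_neg hm]
      rw [ih (names ++ [PySem.Str.strip raw]) fun r hr' => h r (by simp [hr'])]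
      simp

theorem pvNew_mem {n : String} : ∀ {req names : List String},
    n ∈ pvNew req names → ∃ raw ∈ req, n = PySem.Str.strip raw := by
  intro req
  induction req with
  | nil => intro names h; simp [pvNew] at h
  | cons raw rest ih =>
    intro names h
    simp only [pvNew] at h
    split at h
    · obtain ⟨r, hr, he⟩ := ih h; exact ⟨r, by simp [hr], he⟩
    · rcases List.mem_cons.mp h with h | h
      · exact ⟨raw, by simp, h⟩
      · obtain ⟨r, hr, he⟩ := ih h; exact ⟨r, by simp [hr], he⟩

theorem pvBuildB_eq (schema : List (List (String × String))) (ns : List String)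
    (h : ∀ n ∈ ns, (pvLookupB schema n).isSome) :
    pvBuildB schema ns = some (ns.flatMap (fun n => (pvLookupB schema n).toList)) := by
  induction ns with
  | nil => simp [pvBuildB]
  | cons n rest ih =>
    obtain ⟨col, hcol⟩ := Option.isSome_iff_exists.mp (h n (by simp))
    rw [List.flatMap_cons]
    simp only [pvBuildB, hcol, ih fun m hm => h m (by simp [hm]), Option.map_some,
      Option.toList_some, List.singleton_append]

theorem pvLoopA_eq (schema : List (List (String × String))) :
    ∀ (req : List String) (sel : List (List (String × String)))
      (seen : PySem.Set String) (names : List String),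
    (∀ n, PySem.Set.contains seen n = true ↔ n ∈ names) →
    (∀ raw ∈ req, PySem.Str.strip raw ≠ "") →
    (∀ raw ∈ req, (pvLookupB schema (PySem.Str.strip raw)).isSome) →
    (∀ raw ∈ req,
      (schema.foldl (fun d col => d.insert (pvColName col) col) PySem.Dict.empty).get?
          (PySem.Str.strip raw) = pvLookupB schema (PySem.Str.strip raw)) →
    pvLoopA (schema.foldl (fun d col => d.insert (pvColName col) col) PySem.Dict.empty)
        req sel seen
      = some (sel ++ (pvNew req names).flatMap (fun n => (pvLookupB schema n).toList)) := by
  intro req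
  induction req with
  | nil => intro sel seen names _ _ _ _; simp [pvLoopA, pvNew]
  | cons raw rest ih =>
    intro sel seen names hinv hstrip hlook hget
    have hr : PySem.Str.strip raw ≠ "" := hstrip raw (by simp)
    simp only [pvLoopA, if_neg hr, pvNew]
    by_cases hm : PySem.Str.strip raw ∈ names
    · rw [if_pos ((hinv _).mpr hm), if_pos hm]
      exact ih sel seen names hinv (fun r h => hstrip r (by simp [h]))
        (fun r h => hlook r (by simp [h])) (fun r h => hget r (by simp [h]))
    · rw [if_neg (by simpa using fun hc => hm ((hinv _).mp hc)), if_neg hm]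
      obtain ⟨col, hcol⟩ := Option.isSome_iff_exists.mp (hlook raw (by simp))
      simp only [hget raw (by simp), hcol]
      rw [ih (sel ++ [col]) (PySem.Set.add seen (PySem.Str.strip raw))
            (names ++ [PySem.Str.strip raw])
            (by intro n
                have hn := hinv n
                rw [PySem.Set.contains_iff] at hn ⊢
                rw [PySem.Set.mem_add]
                simp [hn])
            (fun r h => hstrip r (by simp [h])) (fun r h => hlook r (by simp [h]))
            (fun r h => hget r (by simp [h]))]
      simp [hcol]

theorem pvLookupB_isSome (schema : List (List (String × String))) (n : String)
    (h : n ∈ schema.map pvColName) : (pvLookupB schema n).isSome := by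
  rw [pvLookupB, List.find?_isSome]
  obtain ⟨col, hc, he⟩ := List.mem_map.mp h
  exact ⟨col, by simp [hc], by simp [he]⟩

-- ===== VERDICT (by name: the statement is the Claim_ definition above) =====
theorem tabular_selected_columns_py_spec : Claim_equal_tabular_selected_columns_py := by
  intro params schema _ hpre
  unfold Spec_tabular_selected_columns_py
  unfold Pre_tabular_selected_columns_py at hpre
  unfold tabular_selected_columns_py tabular_selected_columns_py_alt
  rcases hreq : (PySem.Dict.mk params).get? "columns" with _ | req
  · rfl
  · rw [hreq] at hpre
    simp only [Option.all_some, decide_eq_true_eq] at hpre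
    obtain ⟨hne, hvalid⟩ := hpre
    have hstrip : ∀ raw ∈ req, PySem.Str.strip raw ≠ "" := fun r h => (hvalid r h).1
    have hmem : ∀ raw ∈ req, PySem.Str.strip raw ∈ schema.map pvColName := by
      intro r h
      have := (hvalid r h).2
      exact List.count_pos_iff.mp (by omega)
    have hlook : ∀ raw ∈ req, (pvLookupB schema (PySem.Str.strip raw)).isSome :=
      fun r h => pvLookupB_isSome schema _ (hmem r h)
    have hget : ∀ raw ∈ req,
        (schema.foldl (fun d col => d.insert (pvColName col) col) PySem.Dict.empty).get?
          (PySem.Str.strip raw) = pvLookupB schema (PySem.Str.strip raw) :=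
      fun r h => pvGet_sbn schema _ (hvalid r h).2
    simp only [if_neg hne]
    rw [pvLoopA_eq schema req [] PySem.Set.empty []
          (by intro n; simp [PySem.Set.contains, PySem.Set.empty]) hstrip hlook hget,
        pvNamesB_eq req [] hstrip]
    simp only [List.nil_append]
    rw [pvBuildB_eq schema (pvNew req []) (by
          intro n hn
          obtain ⟨raw, hraw, he⟩ := pvNew_mem hn
          exact he ▸ hlook raw hraw)]
    simp only []
    rcases req with _ | ⟨raw, rest⟩
    · exact absurd rfl hne
    · obtain ⟨col, hcol⟩ := Option.isSome_iff_exists.mp (hlook raw (by simp))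
      simp [pvNew, hcol]
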